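-- pv_equiv track=rewrite | github.com/EliPreston/Python-Mini-Projects | Python Problems 109/problems.py | domino_cycle
-- ===== SOURCE A (Python) =====
-- def domino_cycle(tiles):
--
--     if len(tiles) == 0:
--         return True
--     if len(tiles) == 1:
--         if tiles[0][0] == tiles[0][1]:
--             return True
--         return False
--
--     for i in range(1, len(tiles)):
--         y = tiles[i-1]
--         x = tiles[i]
--
--         if y[1] != x[0]:
--             return False
--
--     if tiles[0][0] == tiles[len(tiles)-1][1]:
--         return True
--     return False
-- ===== SOURCE B (Python) =====
-- def domino_cycle(tiles):
--     # Rotate-and-compare: a valid domino cycle means the list of left halves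
--     # equals the list of right halves rotated one step to the right.
--     firsts = [a for a, _ in tiles]
--     seconds = [b for _, b in tiles]
--     return seconds[-1:] + seconds[:-1] == firsts
-- ===== Notes on version B (the rewrite author's own statement) =====
-- stated objective: alternative
-- what changed: Replaces A's staged control flow (empty case, singleton case, index loop over adjacent pairs with early return, separate wrap-around check) with a whole-list rotate-and-compare: project the left halves and right halves into two lists and test whether the right halves rotated one step to the right equal the left halves.
import Mathlib
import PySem

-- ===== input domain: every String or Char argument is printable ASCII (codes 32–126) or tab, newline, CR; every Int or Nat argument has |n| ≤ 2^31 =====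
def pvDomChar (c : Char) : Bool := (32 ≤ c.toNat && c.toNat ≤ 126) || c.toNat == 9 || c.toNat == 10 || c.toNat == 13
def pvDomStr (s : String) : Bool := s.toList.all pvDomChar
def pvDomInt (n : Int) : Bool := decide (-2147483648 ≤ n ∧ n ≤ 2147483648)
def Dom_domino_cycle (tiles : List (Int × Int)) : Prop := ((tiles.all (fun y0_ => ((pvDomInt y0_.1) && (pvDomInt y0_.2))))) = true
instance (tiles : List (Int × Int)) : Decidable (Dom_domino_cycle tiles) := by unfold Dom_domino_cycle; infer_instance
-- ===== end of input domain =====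

-- B replaces A's staged branch/loop/wrap-check with a rotate-and-compare: the list of left
-- halves must equal the list of right halves rotated one step; equally fast, simpler.


-- ===== PORT A =====
-- tiles[i] for an index the Python code only uses in range; exact there (pyGet? = some).
def dcGet (tiles : List (Int × Int)) (i : Int) : Int × Int :=
  (PySem.List.pyGet? tiles i).getD (0, 0)

-- the 'for i in range(1, len(tiles))' loop with its early return, then the final wrap check
def dcLoopA (tiles : List (Int × Int)) : List Int → Bool
  | [] => (dcGet tiles 0).1 == (dcGet tiles ((tiles.length : Int) - 1)).2
  | i :: rest =>
      if (dcGet tiles (i - 1)).2 != (dcGet tiles i).1 then false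
      else dcLoopA tiles rest

def domino_cycle (tiles : List (Int × Int)) : Bool :=
  if tiles.length = 0 then true
  else if tiles.length = 1 then
    (if (dcGet tiles 0).1 == (dcGet tiles 0).2 then true else false)
  else
    dcLoopA tiles (PySem.List.pyRange 1 (tiles.length : Int) 1)

-- ===== PORT B =====
-- firsts = [a for a, _ in tiles]; seconds = [b for _, b in tiles];
-- return seconds[-1:] + seconds[:-1] == firsts
def domino_cycle_alt (tiles : List (Int × Int)) : Bool :=
  let firsts := tiles.map Prod.fst
  let seconds := tiles.map Prod.snd
  (PySem.List.slice seconds (some (-1)) none ++ PySem.List.slice seconds none (some (-1))) == firsts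

-- ===== PRECONDITION & SPEC =====
def Spec_domino_cycle (tiles : List (Int × Int)) (out : Bool) : Prop := out = domino_cycle_alt tiles
instance (tiles : List (Int × Int)) (out : Bool) : Decidable (Spec_domino_cycle tiles out) := by unfold Spec_domino_cycle; infer_instance

-- ===== CLAIM (what is proved, stated in full; the proofs are below) =====
def Claim_equal_domino_cycle : Prop := ∀ (tiles : List (Int × Int)), Dom_domino_cycle tiles → Spec_domino_cycle tiles (domino_cycle tiles)

-- ===== LEMMAS AND PROOFS =====

-- common canonical form: the forward adjacency chain …
def chain : List (Int × Int) → Bool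
  | [] => true
  | [_] => true
  | a :: b :: r => (a.2 == b.1) && chain (b :: r)

-- … plus the wrap-around check
def canon : List (Int × Int) → Bool
  | [] => true
  | t :: rest => (((t :: rest).getLast (List.cons_ne_nil t rest)).2 == t.1) && chain (t :: rest)

theorem chain_short (tiles : List (Int × Int)) (h : tiles.length ≤ 1) : chain tiles = true := by
  match tiles, h with
  | [], _ => rfl
  | [_], _ => rfl

-- dcGet at an in-range Nat index is plain indexing
theorem dcGet_nat (tiles : List (Int × Int)) (k : Nat) (hk : k < tiles.length) :
    dcGet tiles (k : Int) = tiles[k] := by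
  simp [dcGet, hk]

-- A's index loop over range(k, n) computes the chain of the (k-1)-suffix, then the wrap check
theorem dcLoopA_drop (tiles : List (Int × Int)) (k : Nat) (hk : 0 < k) :
    dcLoopA tiles (PySem.List.pyRange (k : Int) (tiles.length : Int) 1) =
      (chain (tiles.drop (k - 1)) &&
        ((dcGet tiles 0).1 == (dcGet tiles ((tiles.length : Int) - 1)).2)) := by
  generalize hd : tiles.length - k = d
  induction d generalizing k with
  | zero =>
      have hle : tiles.length ≤ k := by omega
      rw [PySem.List.pyRange_one_eq_nil (by exact_mod_cast hle)]
      rw [chain_short (tiles.drop (k - 1)) (by simp; omega)]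
      simp [dcLoopA]
  | succ d ih =>
      have hlt : k < tiles.length := by omega
      rw [PySem.List.pyRange_one_cons (by exact_mod_cast hlt)]
      simp only [dcLoopA]
      have hk1 : (k : Int) - 1 = ((k - 1 : Nat) : Int) := by omega
      have hk2 : (k : Int) + 1 = ((k + 1 : Nat) : Int) := by push_cast; ring
      rw [hk1, dcGet_nat tiles (k - 1) (by omega), dcGet_nat tiles k hlt, hk2,
          ih (k + 1) (by omega) (by omega)]
      have e1 : k + 1 - 1 = k := by omega
      have e2 : k - 1 + 1 = k := by omega
      rw [e1, List.drop_eq_getElem_cons (by omega : k - 1 < tiles.length), e2,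
          List.drop_eq_getElem_cons hlt]
      simp only [chain]
      cases hab : (tiles[k - 1].2 == tiles[k].1)
      · have hne : ¬ tiles[k - 1].2 = tiles[k].1 := by simpa using hab
        simp [hne]
      · have heq : tiles[k - 1].2 = tiles[k].1 := by simpa using hab
        simp [heq]

theorem dcGet_last (tiles : List (Int × Int)) (h : tiles ≠ []) :
    dcGet tiles ((tiles.length : Int) - 1) = tiles.getLast h := by
  have hlen : 0 < tiles.length := List.length_pos_iff.mpr h
  have h1 : (tiles.length : Int) - 1 = ((tiles.length - 1 : Nat) : Int) := by omega
  rw [h1, dcGet_nat tiles (tiles.length - 1) (by omega), List.getLast_eq_getElem]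

theorem domino_cycle_eq_canon (tiles : List (Int × Int)) :
    domino_cycle tiles = canon tiles := by
  match tiles with
  | [] => rfl
  | t :: rest =>
      have hne : t :: rest ≠ [] := List.cons_ne_nil t rest
      unfold domino_cycle
      by_cases h1 : (t :: rest).length = 1
      · rw [if_neg (by simp), if_pos h1]
        match rest, h1 with
        | [], _ =>
            simp [canon, chain, dcGet, PySem.List.pyGet?, PySem.List.pyIdx?, Bool.beq_comm]
            by_cases h : t.1 = t.2 <;> simp [h]
      · rw [if_neg (by simp), if_neg h1]
        have h0 : dcGet (t :: rest) 0 = t := by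
          have := dcGet_nat (t :: rest) 0 (by simp)
          simpa using this
        have hlast := dcGet_last (t :: rest) hne
        have hmain := dcLoopA_drop (t :: rest) 1 (by omega)
        simp only [Nat.cast_one, Nat.sub_self, List.drop_zero] at hmain
        simp only [canon]
        rw [hmain, h0, hlast, Bool.and_comm, Bool.beq_comm]

theorem chain_eq_beq : ∀ (tiles : List (Int × Int)),
    ((tiles.map Prod.snd).dropLast == tiles.tail.map Prod.fst) = chain tiles
  | [] => rfl
  | [_] => rfl
  | a :: b :: r => by
      have ih := chain_eq_beq (b :: r)
      simp only [List.map_cons, List.tail_cons] at ih ⊢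
      rw [List.dropLast_cons_of_ne_nil (by simp), List.cons_beq_cons, ih]
      simp [chain]

theorem alt_eq_canon (tiles : List (Int × Int)) :
    domino_cycle_alt tiles = canon tiles := by
  match tiles with
  | [] => rfl
  | t :: rest =>
      have hne : t :: rest ≠ [] := List.cons_ne_nil t rest
      have hne' : ((t :: rest).map Prod.snd) ≠ [] := by simp
      have hlm : ((t :: rest).map Prod.snd).getLast hne' = ((t :: rest).getLast hne).2 :=
        List.getLast_map hne'
      have hch := chain_eq_beq (t :: rest)
      simp only [List.tail_cons] at hch
      simp only [domino_cycle_alt, canon]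
      rw [PySem.List.slice_from_neg_one, PySem.List.slice_to_neg_one,
          List.drop_length_sub_one hne', hlm, List.cons_append, List.nil_append,
          show List.map Prod.fst (t :: rest) = t.1 :: List.map Prod.fst rest from rfl,
          List.cons_beq_cons, hch]

-- ===== VERDICT (by name: the statement is the Claim_ definition above) =====
theorem domino_cycle_spec : Claim_equal_domino_cycle := by
  intro tiles _
  unfold Spec_domino_cycle
  rw [domino_cycle_eq_canon, alt_eq_canon]
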